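-- pv_equiv track=rewrite | github.com/alpha34727/cpp | test.py | yieldAllCombos
-- ===== SOURCE A (Python) =====
-- def yieldAllCombos(items):
--     """
--       Generates all combinations of N items into two bags, whereby each
--       item is in one or zero bags.
--
--       Yields a tuple, (bag1, bag2), where each bag is represented as
--       a list of which item(s) are in each bag.
--     """
--
--     n = len(items)
--
--     for i in range(3**n):
--         bag1 = []
--         bag2 = []
--         j = i
--         bit = 0
--         while j > 0:
--             if j % 3 == 1:
--                 bag1.append(items[bit])
--             elif j % 3 == 2:
--                 bag2.append(items[bit])
--             j //= 3
--             bit += 1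
--
--         yield (bag1, bag2)
-- ===== SOURCE B (Python) =====
-- def yieldAllCombos(items):
--     """Same combinations, generated by recursion on the last item instead of
--     base-3 counting: item 0 varies fastest, so the order matches exactly."""
--     if not items:
--         yield ([], [])
--         return
--     x = items[-1]
--     for b1, b2 in yieldAllCombos(items[:-1]):
--         yield (b1, b2)
--     for b1, b2 in yieldAllCombos(items[:-1]):
--         yield (b1 + [x], b2)
--     for b1, b2 in yieldAllCombos(items[:-1]):
--         yield (b1, b2 + [x])
-- ===== Notes on version B (the rewrite author's own statement) =====
-- stated objective: simpler
-- what changed: Replaces A's base-3 counter (iterate i over 3**n and decode i's digits with a while-loop) by direct recursion on the last item: recurse on items[:-1] and emit the three choices (neither bag / bag1 / bag2) for the last item in that order, which reproduces A's exact yield order.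
import Mathlib
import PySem

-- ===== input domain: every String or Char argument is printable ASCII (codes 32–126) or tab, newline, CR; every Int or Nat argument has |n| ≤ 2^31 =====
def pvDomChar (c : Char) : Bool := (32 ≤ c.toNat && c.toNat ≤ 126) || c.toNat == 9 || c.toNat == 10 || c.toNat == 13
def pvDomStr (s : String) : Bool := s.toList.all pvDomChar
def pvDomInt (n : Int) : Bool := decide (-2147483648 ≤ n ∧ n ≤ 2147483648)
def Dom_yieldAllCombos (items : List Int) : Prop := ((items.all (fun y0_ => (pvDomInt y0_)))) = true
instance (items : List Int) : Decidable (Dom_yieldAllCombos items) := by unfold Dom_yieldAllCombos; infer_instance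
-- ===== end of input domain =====

-- B replaces A's base-3 counter decoding by recursion on the last item (same output, same order); objective: simpler.

-- ===== PORT A =====
-- the inner while-loop of A: j, bit, bag1, bag2 as in the Python (j is the
-- loop counter's residue, always ≥ 0 in Python, hence Nat; j //= 3 on a
-- nonnegative j is Nat division)
def pvLoopA (items : List Int) (j bit : Nat) (bag1 bag2 : List Int) : List Int × List Int :=
  if j > 0 then
    -- items[bit]: in every reachable call bit < items.length, so getD's default is never used
    let bag1' := if j % 3 = 1 then bag1 ++ [(PySem.List.pyGet? items (bit : Int)).getD 0] else bag1
    let bag2' := if j % 3 = 2 then bag2 ++ [(PySem.List.pyGet? items (bit : Int)).getD 0] else bag2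
    pvLoopA items (j / 3) (bit + 1) bag1' bag2'
  else (bag1, bag2)
termination_by j
decreasing_by exact Nat.div_lt_self (by omega) (by norm_num)

def yieldAllCombos (items : List Int) : List (List Int × List Int) :=
  -- for i in range(3**n): … yield (bag1, bag2)   (i ≥ 0, so i.toNat is exact)
  (PySem.List.pyRange 0 ((3 : Int) ^ items.length) 1).map
    (fun i => pvLoopA items i.toNat 0 [] [])

-- ===== PORT B =====
def yieldAllCombos_alt (items : List Int) : List (List Int × List Int) :=
  if h : items = [] then [([], [])]
  else
    -- x = items[-1] (list nonempty); items[:-1] = dropLast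
    let x := items.getLast h
    let prev := yieldAllCombos_alt items.dropLast
    prev ++ prev.map (fun p => (p.1 ++ [x], p.2)) ++ prev.map (fun p => (p.1, p.2 ++ [x]))
termination_by items.length
decreasing_by
  have := List.length_pos_iff.mpr h
  simp [List.length_dropLast]; omega

-- ===== PRECONDITION & SPEC =====
def Spec_yieldAllCombos (items : List Int) (out : List (List Int × List Int)) : Prop := out = yieldAllCombos_alt items
instance (items : List Int) (out : List (List Int × List Int)) : Decidable (Spec_yieldAllCombos items out) := by unfold Spec_yieldAllCombos; infer_instance

-- ===== CLAIM (what is proved, stated in full; the proofs are below) =====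
def Claim_equal_yieldAllCombos : Prop := ∀ (items : List Int), Dom_yieldAllCombos items → Spec_yieldAllCombos items (yieldAllCombos items)

-- ===== LEMMAS AND PROOFS =====

-- "process exactly k base-3 digits" — a fuelled version of A's while loop
def pvProcK (items : List Int) : Nat → Nat → Nat → List Int → List Int → List Int × List Int
  | 0, _, _, b1, b2 => (b1, b2)
  | k + 1, j, bit, b1, b2 =>
    let b1' := if j % 3 = 1 then b1 ++ [(PySem.List.pyGet? items (bit : Int)).getD 0] else b1
    let b2' := if j % 3 = 2 then b2 ++ [(PySem.List.pyGet? items (bit : Int)).getD 0] else b2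
    pvProcK items k (j / 3) (bit + 1) b1' b2'

theorem pvProcK_zero (items : List Int) (k : Nat) :
    ∀ bit b1 b2, pvProcK items k 0 bit b1 b2 = (b1, b2) := by
  induction k with
  | zero => intro bit b1 b2; rfl
  | succ k ih => intro bit b1 b2; simp [pvProcK, ih]

theorem pvLoopA_eq_procK (items : List Int) (k : Nat) :
    ∀ j bit b1 b2, j < 3 ^ k → pvLoopA items j bit b1 b2 = pvProcK items k j bit b1 b2 := by
  induction k with
  | zero =>
    intro j bit b1 b2 hj
    have : j = 0 := by simpa using hj
    subst this
    rw [pvLoopA]; rfl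
  | succ k ih =>
    intro j bit b1 b2 hj
    by_cases h0 : j = 0
    · subst h0
      rw [pvLoopA, pvProcK]
      simp [pvProcK_zero]
    · rw [pvLoopA, pvProcK]
      have hpos : j > 0 := Nat.pos_of_ne_zero h0
      simp only [hpos, if_true]
      apply ih
      have : (3 : Nat) ^ (k + 1) = 3 ^ k * 3 := by ring
      rw [this] at hj
      omega

-- pvProcK does not look past position bit + k - 1, so appending an element
-- after that point changes nothing
theorem pvProcK_append (ys : List Int) (x : Int) (k : Nat) :
    ∀ j bit b1 b2, bit + k ≤ ys.length →
      pvProcK (ys ++ [x]) k j bit b1 b2 = pvProcK ys k j bit b1 b2 := by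
  induction k with
  | zero => intro j bit b1 b2 _; rfl
  | succ k ih =>
    intro j bit b1 b2 hle
    have hbit : bit < ys.length := by omega
    have hget : PySem.List.pyGet? (ys ++ [x]) (bit : Int) = PySem.List.pyGet? ys (bit : Int) := by
      rw [PySem.List.pyGet?_natCast, PySem.List.pyGet?_natCast,
        List.getElem?_append_left hbit]
    rw [pvProcK, pvProcK]
    simp only [hget]
    exact ih _ _ _ _ (by omega)

-- decoding the top digit c of c*3^m + r (r < 3^m) appends x = items[bit+m]
theorem pvProcK_top (x : Int) (m : Nat) :
    ∀ (ys : List Int) (c r bit : Nat) (b1 b2 : List Int), c < 3 → r < 3 ^ m →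
      bit + m = ys.length →
      pvProcK (ys ++ [x]) (m + 1) (c * 3 ^ m + r) bit b1 b2 =
        (let p := pvProcK (ys ++ [x]) m r bit b1 b2
         if c = 1 then (p.1 ++ [x], p.2) else if c = 2 then (p.1, p.2 ++ [x]) else p) := by
  induction m with
  | zero =>
    intro ys c r bit b1 b2 hc hr hbit
    have hr0 : r = 0 := by omega
    subst hr0
    have hg : (ys ++ [x])[bit]? = some x := by
      rw [← PySem.List.pyGet?_natCast]
      subst hbit
      simpa using PySem.List.pyGet?_append_length ys x []
    rw [pvProcK]
    interval_cases c <;> simp [pvProcK, pvProcK_zero, hg]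
  | succ m ih =>
    intro ys c r bit b1 b2 hc hr hbit
    set a := 3 ^ m with ha
    have hj3 : c * 3 ^ (m + 1) + r = (c * a) * 3 + r := by rw [ha]; ring
    have hmod : ((c * a) * 3 + r) % 3 = r % 3 := by omega
    have hdiv : ((c * a) * 3 + r) / 3 = c * a + r / 3 := by omega
    rw [show m + 1 + 1 = (m + 1) + 1 from rfl, pvProcK, hj3]
    simp only [hmod, hdiv]
    rw [ih ys c (r / 3) (bit + 1) _ _ hc (by omega) (by omega)]
    conv_rhs => rw [pvProcK]

-- A as a map over Nat-range
theorem pvA_eq_range (items : List Int) :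
    yieldAllCombos items =
      (List.range (3 ^ items.length)).map (fun k => pvLoopA items k 0 [] []) := by
  unfold yieldAllCombos
  have hN : ((3 : Int) ^ items.length) = ((3 ^ items.length : Nat) : Int) := by push_cast; ring
  rw [hN, PySem.List.pyRange_one]
  rw [show (((3 ^ items.length : Nat) : Int) - 0).toNat = 3 ^ items.length by
    rw [Int.sub_zero, Int.toNat_natCast]]
  rw [List.map_map]
  apply List.map_congr_left
  intro k hk
  simp

-- A's concat recurrence
theorem pvA_concat (ys : List Int) (x : Int) :
    yieldAllCombos (ys ++ [x]) =
      yieldAllCombos ys ++ (yieldAllCombos ys).map (fun p => (p.1 ++ [x], p.2))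
        ++ (yieldAllCombos ys).map (fun p => (p.1, p.2 ++ [x])) := by
  rw [pvA_eq_range, pvA_eq_range]
  set n := ys.length with hn
  have hlen : (ys ++ [x]).length = n + 1 := by simp [hn]
  rw [hlen]
  have hsplit : (3 : Nat) ^ (n + 1) = 3 ^ n + (3 ^ n + 3 ^ n) := by ring
  rw [hsplit, List.range_add, List.range_add]
  simp only [List.map_append, List.map_map]
  have hchunk : ∀ c : Nat, c < 3 → ∀ k ∈ List.range (3 ^ n),
      pvLoopA (ys ++ [x]) (c * 3 ^ n + k) 0 [] [] =
        (let p := pvLoopA ys k 0 [] []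
         if c = 1 then (p.1 ++ [x], p.2) else if c = 2 then (p.1, p.2 ++ [x]) else p) := by
    intro c hc k hk
    rw [List.mem_range] at hk
    have h1 : c * 3 ^ n + k < 3 ^ (n + 1) := by
      have : (3 : Nat) ^ (n + 1) = 3 ^ n * 3 := by ring
      rw [this]; nlinarith
    rw [pvLoopA_eq_procK _ (n + 1) _ _ _ _ h1,
      pvProcK_top x n ys c k 0 [] [] hc hk (by omega),
      pvProcK_append ys x n _ _ _ _ (by omega),
      ← pvLoopA_eq_procK _ n _ _ _ _ hk]
  have h0 := hchunk 0 (by omega)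
  have h1 := hchunk 1 (by omega)
  have h2 := hchunk 2 (by omega)
  rw [← List.append_assoc]
  congr 1
  · congr 1
    · apply List.map_congr_left
      intro k hk
      simpa using h0 k hk
    · apply List.map_congr_left
      intro k hk
      have h := h1 k hk
      simp only [one_mul] at h
      simpa [Function.comp] using h
  · apply List.map_congr_left
    intro k hk
    have h := h2 k hk
    have harith : 2 * 3 ^ n + k = 3 ^ n + (3 ^ n + k) := by ring
    rw [harith] at h
    simpa [Function.comp] using h

-- B's concat recurrence
theorem pvB_concat (ys : List Int) (x : Int) :
    yieldAllCombos_alt (ys ++ [x]) =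
      yieldAllCombos_alt ys ++ (yieldAllCombos_alt ys).map (fun p => (p.1 ++ [x], p.2))
        ++ (yieldAllCombos_alt ys).map (fun p => (p.1, p.2 ++ [x])) := by
  rw [yieldAllCombos_alt]
  have hne : ys ++ [x] ≠ [] := by simp
  simp [hne, List.getLast_concat]

-- ===== VERDICT (by name: the statement is the Claim_ definition above) =====
theorem pv_main (items : List Int) : yieldAllCombos items = yieldAllCombos_alt items := by
  induction items using List.reverseRecOn with
  | nil =>
    rw [pvA_eq_range]
    rw [show (3 : Nat) ^ (List.length ([] : List Int)) = 1 from rfl]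
    rw [show List.range 1 = [0] from rfl]
    rw [List.map_singleton, pvLoopA, yieldAllCombos_alt]
    simp
  | append_singleton ys x ih =>
    rw [pvA_concat, pvB_concat, ih]

theorem yieldAllCombos_spec : Claim_equal_yieldAllCombos :=
  fun items _ => pv_main items
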